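-- pv_equiv track=rewrite | github.com/dougfoo/karuisearch | src/scrapers/resort_innovation_scraper.py | filter_property_images
-- ===== SOURCE A (Python) =====
-- from typing import List, Optional, Dict, Any
--
-- def filter_property_images(img_urls: List[str]) -> List[str]:
--     """Filter image URLs to prioritize property photos over UI elements"""
--     if not img_urls:
--         return []
--
--     property_images = []
--     ui_images = []
--
--     for img_url in img_urls:
--         # Skip obvious UI elements
--         if any(skip in img_url.lower() for skip in [
--             'logo', 'icon', 'btn_', 'button', 'nav_', 'menu_', 'header', 'footer',
--             'arrow', 'bullet', 'spacer', 'line', 'bg_', 'background'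
--         ]):
--             continue
--
--         # Prioritize property-related images
--         if any(priority in img_url.lower() for priority in [
--             'property', 'house', 'home', 'villa', 'building', 'exterior', 'interior',
--             'photo', 'image', 'gallery', 'main', 'view'
--         ]):
--             property_images.append(img_url)
--         else:
--             ui_images.append(img_url)
--
--     # Combine: property photos first, then other images
--     final_images = property_images + ui_images
--
--     # Limit to 5 images total
--     return final_images[:5]
-- ===== SOURCE B (Python) =====
-- SKIP = ['logo', 'icon', 'btn_', 'button', 'nav_', 'menu_', 'header', 'footer',
--         'arrow', 'bullet', 'spacer', 'line', 'bg_', 'background']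
-- PRIORITY = ['property', 'house', 'home', 'villa', 'building', 'exterior', 'interior',
--             'photo', 'image', 'gallery', 'main', 'view']
--
-- def _fill(out, urls, pred):
--     # append matching urls to out, stopping as soon as out holds 5
--     for u in urls:
--         if len(out) == 5:
--             break
--         if pred(u.lower()):
--             out.append(u)
--     return out
--
-- def filter_property_images(img_urls):
--     keep = lambda l: not any(s in l for s in SKIP)
--     pri = lambda l: any(p in l for p in PRIORITY)
--     out = _fill([], img_urls, lambda l: keep(l) and pri(l))
--     return _fill(out, img_urls, lambda l: keep(l) and not pri(l))
-- ===== Notes on version B (the rewrite author's own statement) =====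
-- stated objective: alternative
-- what changed: Replaces A's single classify-everything loop (two growing accumulator lists, concatenated then sliced) with two early-stopping fill passes over the input that each break as soon as the output holds five urls.
import Mathlib
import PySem

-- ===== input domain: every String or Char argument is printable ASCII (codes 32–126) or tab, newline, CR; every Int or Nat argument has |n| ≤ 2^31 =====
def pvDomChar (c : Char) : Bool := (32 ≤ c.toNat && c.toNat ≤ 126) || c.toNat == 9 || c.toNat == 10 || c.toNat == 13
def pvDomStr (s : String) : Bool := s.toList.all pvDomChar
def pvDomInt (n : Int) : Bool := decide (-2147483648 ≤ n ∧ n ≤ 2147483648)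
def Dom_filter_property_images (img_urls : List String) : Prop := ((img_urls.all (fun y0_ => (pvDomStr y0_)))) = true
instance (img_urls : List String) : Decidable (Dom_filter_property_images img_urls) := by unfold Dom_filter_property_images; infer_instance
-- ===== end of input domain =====

-- B replaces A's single classify-everything loop (two growing accumulators, then
-- concatenate and slice) by two early-stopping fill passes that stop as soon as
-- five urls are collected (alternative decomposition; not claimed faster).

-- ===== PORT A =====
def pvSkipList : List String :=
  ["logo", "icon", "btn_", "button", "nav_", "menu_", "header", "footer",
   "arrow", "bullet", "spacer", "line", "bg_", "background"]

def pvPriList : List String :=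
  ["property", "house", "home", "villa", "building", "exterior", "interior",
   "photo", "image", "gallery", "main", "view"]

-- any(skip in img_url.lower() for skip in [...])
def pvIsSkip (u : String) : Bool := pvSkipList.any (fun s => PySem.Str.isIn s (PySem.Str.lower u))

-- any(priority in img_url.lower() for priority in [...])
def pvIsPri (u : String) : Bool := pvPriList.any (fun s => PySem.Str.isIn s (PySem.Str.lower u))

def filter_property_images (img_urls : List String) : List String :=
  if img_urls = [] then []
  else
    -- the loop: two accumulators property_images / ui_images
    let st := img_urls.foldl (fun (acc : List String × List String) u =>
      if pvIsSkip u then acc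
      else if pvIsPri u then (acc.1 ++ [u], acc.2)
      else (acc.1, acc.2 ++ [u])) ([], [])
    -- final_images[:5]
    PySem.List.slice (st.1 ++ st.2) none (some 5)

-- ===== PORT B =====
-- keep(l) and pri(l), applied to the lowered url
def pvWantPri (l : String) : Bool :=
  !(pvSkipList.any (fun s => PySem.Str.isIn s l)) && (pvPriList.any (fun p => PySem.Str.isIn p l))

-- keep(l) and not pri(l)
def pvWantRest (l : String) : Bool :=
  !(pvSkipList.any (fun s => PySem.Str.isIn s l)) && !(pvPriList.any (fun p => PySem.Str.isIn p l))

-- the _fill loop of Source B: append matching urls, break once out holds 5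
def pvFill (pred : String → Bool) : List String → List String → List String
  | out, [] => out
  | out, u :: us =>
      if out.length == 5 then out
      else if pred (PySem.Str.lower u) then pvFill pred (out ++ [u]) us
      else pvFill pred out us

def filter_property_images_alt (img_urls : List String) : List String :=
  pvFill pvWantRest (pvFill pvWantPri [] img_urls) img_urls

-- ===== PRECONDITION & SPEC =====
def Spec_filter_property_images (img_urls : List String) (out : List String) : Prop := out = filter_property_images_alt img_urls
instance (img_urls : List String) (out : List String) : Decidable (Spec_filter_property_images img_urls out) := by unfold Spec_filter_property_images; infer_instance

-- ===== CLAIM (what is proved, stated in full; the proofs are below) =====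
def Claim_equal_filter_property_images : Prop := ∀ (img_urls : List String), Dom_filter_property_images img_urls → Spec_filter_property_images img_urls (filter_property_images img_urls)

-- ===== LEMMAS AND PROOFS =====

-- A's loop, characterised: it appends the kept priority urls to the first
-- accumulator and the kept non-priority urls to the second.
theorem pv_foldlA (xs : List String) (p u : List String) :
    xs.foldl (fun (acc : List String × List String) x =>
      if pvIsSkip x then acc
      else if pvIsPri x then (acc.1 ++ [x], acc.2)
      else (acc.1, acc.2 ++ [x])) (p, u)
    = (p ++ (xs.filter (fun x => !pvIsSkip x && pvIsPri x)),
       u ++ (xs.filter (fun x => !pvIsSkip x && !pvIsPri x))) := by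
  induction xs generalizing p u with
  | nil => simp
  | cons x xs ih =>
    by_cases hs : pvIsSkip x
    · simp [List.foldl_cons, hs, ih]
    · by_cases hp : pvIsPri x
      · simp [List.foldl_cons, hs, hp, ih]
      · simp [List.foldl_cons, hs, hp, ih]

-- B's fill loop, characterised: it tops out up to five matching urls.
theorem pv_fill_spec (pred : String → Bool) (us : List String) (out : List String)
    (h : out.length ≤ 5) :
    pvFill pred out us
      = out ++ (us.filter (fun u => pred (PySem.Str.lower u))).take (5 - out.length) := by
  induction us generalizing out with
  | nil => simp [pvFill]
  | cons u us ih =>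
    by_cases h5 : out.length = 5
    · simp [pvFill, h5]
    · have hlt : out.length < 5 := lt_of_le_of_ne h h5
      by_cases hp : pred (PySem.Str.lower u)
      · have hsub : 5 - out.length = (5 - (out ++ [u]).length) + 1 := by
          simp; omega
        simp only [pvFill, beq_iff_eq, h5, if_false, hp, if_true]
        rw [ih (out ++ [u]) (by simp; omega)]
        simp only [List.filter_cons, hp, hsub]
        simp
      · simp only [pvFill, beq_iff_eq, h5, if_false, hp, if_false]
        rw [ih out h]
        simp [hp]

-- the two want-predicates, expressed through A's tests
theorem pv_wantPri_eq (u : String) : pvWantPri (PySem.Str.lower u) = (!pvIsSkip u && pvIsPri u) := rfl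
theorem pv_wantRest_eq (u : String) : pvWantRest (PySem.Str.lower u) = (!pvIsSkip u && !pvIsPri u) := rfl

theorem pv_slice5 (xs : List String) : PySem.List.slice xs none (some 5) = xs.take 5 := by
  have := PySem.List.slice_to_natCast xs 5
  simpa using this

-- ===== VERDICT (by name: the statement is the Claim_ definition above) =====
theorem filter_property_images_spec : Claim_equal_filter_property_images := by
  intro l _
  unfold Spec_filter_property_images filter_property_images filter_property_images_alt
  dsimp only
  -- name the two filtered sublists
  set P := l.filter (fun x => !pvIsSkip x && pvIsPri x) with hP
  set R := l.filter (fun x => !pvIsSkip x && !pvIsPri x) with hR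
  have hB : pvFill pvWantRest (pvFill pvWantPri [] l) l
      = P.take 5 ++ R.take (5 - (P.take 5).length) := by
    rw [pv_fill_spec pvWantPri l [] (by simp)]
    simp only [List.nil_append, List.length_nil, Nat.sub_zero]
    have hfP : l.filter (fun u => pvWantPri (PySem.Str.lower u)) = P := by
      rw [hP]; apply List.filter_congr; intro x _; exact pv_wantPri_eq x
    have hfR : l.filter (fun u => pvWantRest (PySem.Str.lower u)) = R := by
      rw [hR]; apply List.filter_congr; intro x _; exact pv_wantRest_eq x
    rw [hfP, pv_fill_spec pvWantRest l (P.take 5) (by simp), hfR]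
  rw [hB]
  by_cases h : l = []
  · simp [h, hP, hR]
  · simp only [h, ite_false]
    rw [pv_foldlA]
    simp only [List.nil_append]
    rw [pv_slice5, ← hP, ← hR, List.take_append]
    congr 1
    have : (P.take 5).length = min 5 P.length := by simp
    rw [this]
    congr 1
    omega
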